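-- pv_equiv track=rewrite | github.com/ThatMajd/AI_HW1 | ex1.py | can_crash
-- ===== SOURCE A (Python) =====
-- def can_crash(action):
--     seen = set()
--     for act in action:
--         if act[1] not in seen:
--             seen.add(act[1])
--         else:
--             return True
--     return False
-- ===== SOURCE B (Python) =====
-- def can_crash(action):
--     items = list(action)
--     seconds = {act[1] for act in items}
--     return len(seconds) != len(items)
-- ===== Notes on version B (the rewrite author's own statement) =====
-- stated objective: simpler
-- what changed: Replaces the incremental membership-check loop with early return by a whole-pass set comprehension over the second elements and a distinct-count-versus-total comparison.
import Mathlib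
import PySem

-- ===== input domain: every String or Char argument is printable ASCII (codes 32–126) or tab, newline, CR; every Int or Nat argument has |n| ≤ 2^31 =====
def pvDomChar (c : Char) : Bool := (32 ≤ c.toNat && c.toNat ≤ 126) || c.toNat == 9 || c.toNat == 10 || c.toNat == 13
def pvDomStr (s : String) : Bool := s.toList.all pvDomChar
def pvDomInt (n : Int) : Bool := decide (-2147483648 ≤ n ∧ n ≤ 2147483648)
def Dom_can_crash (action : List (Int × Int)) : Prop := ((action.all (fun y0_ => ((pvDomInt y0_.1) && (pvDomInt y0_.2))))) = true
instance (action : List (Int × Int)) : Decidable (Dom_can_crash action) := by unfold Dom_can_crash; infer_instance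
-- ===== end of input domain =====

-- B replaces A's incremental membership-check loop (with early return) by a whole-pass
-- distinct-count-versus-total comparison; objective: simpler.

-- ===== PORT A =====
-- the for-loop with 'seen', early 'return True', final 'return False'
def canCrashLoop (seen : PySem.Set Int) : List (Int × Int) → Bool
  | [] => false
  | act :: rest =>
      if PySem.Set.contains seen act.2 = false then
        canCrashLoop (PySem.Set.add seen act.2) rest
      else
        true

def can_crash (action : List (Int × Int)) : Bool :=
  canCrashLoop PySem.Set.empty action

-- ===== PORT B =====
def can_crash_alt (action : List (Int × Int)) : Bool :=
  let items := action
  let seconds := PySem.Set.ofList (items.map (fun act => act.2))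
  decide (PySem.Set.len seconds ≠ items.length)

-- ===== PRECONDITION & SPEC =====
def Spec_can_crash (action : List (Int × Int)) (out : Bool) : Prop := out = can_crash_alt action
instance (action : List (Int × Int)) (out : Bool) : Decidable (Spec_can_crash action out) := by unfold Spec_can_crash; infer_instance

-- ===== CLAIM (what is proved, stated in full; the proofs are below) =====
def Claim_equal_can_crash : Prop := ∀ (action : List (Int × Int)), Dom_can_crash action → Spec_can_crash action (can_crash action)

-- ===== LEMMAS AND PROOFS =====

theorem update_length_le (l : List Int) (s : PySem.Set Int) :
    (PySem.Set.update s l).length ≤ s.length + l.length := by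
  induction l generalizing s with
  | nil => simp [PySem.Set.update_nil]
  | cons x xs ih =>
      rw [PySem.Set.update_cons]
      calc (PySem.Set.update (PySem.Set.add s x) xs).length
          ≤ (PySem.Set.add s x).length + xs.length := ih _
        _ ≤ s.length + (x :: xs).length := by
            rw [PySem.Set.add_eq_ite]
            split
            · simp
            · simp
              omega

theorem loop_char (xs : List (Int × Int)) (seen : PySem.Set Int) :
    canCrashLoop seen xs =
      decide ((PySem.Set.update seen (xs.map (fun act => act.2))).length ≠ seen.length + xs.length) := by
  induction xs generalizing seen with
  | nil => simp [canCrashLoop, PySem.Set.update_nil]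
  | cons act rest ih =>
      by_cases h : act.2 ∈ seen
      · have hc : PySem.Set.contains seen act.2 = true := by simp [h]
        rw [canCrashLoop, hc]
        rw [List.map_cons, PySem.Set.update_cons, PySem.Set.add_of_mem h]
        have hle := update_length_le (rest.map (fun act => act.2)) seen
        simp only [List.length_map] at hle
        simp only [List.length_cons]
        simp
        omega
      · have hc : PySem.Set.contains seen act.2 = false := by simp [h]
        rw [canCrashLoop, hc]
        rw [ih, List.map_cons, PySem.Set.update_cons]
        have hlen : (PySem.Set.add seen act.2).length = seen.length + 1 := by
          rw [PySem.Set.add_of_not_mem h]; simp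
        rw [hlen]
        simp only [List.length_cons, if_pos trivial]
        rw [decide_eq_decide]
        constructor <;> intro hx <;> omega

-- ===== VERDICT (by name: the statement is the Claim_ definition above) =====
theorem can_crash_spec : Claim_equal_can_crash := by
  intro action _
  unfold Spec_can_crash can_crash can_crash_alt
  rw [loop_char]
  have : PySem.Set.update PySem.Set.empty (action.map (fun act => act.2)) =
      PySem.Set.ofList (action.map (fun act => act.2)) := by
    rfl
  rw [this]
  simp [PySem.Set.len]
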